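-- pv_equiv track=rewrite | github.com/chenla/hoard | src/hord/import_cards.py | _strip_logseq_bullets
-- ===== SOURCE A (Python) =====
-- def _strip_logseq_bullets(text: str) -> str:
--     """Convert Logseq outliner bullets to normal paragraphs.
--
--     Logseq stores everything as `- ` prefixed bullets.
--     Nested bullets get extra indentation.  We flatten the
--     top-level bullets to paragraphs and keep nested ones
--     as indented list items.
--     """
--     lines = text.split("\n")
--     result = []
--     for line in lines:
--         stripped = line.lstrip()
--         indent = len(line) - len(stripped)
--         if stripped.startswith("- ") and indent == 0:
--             # Top-level bullet → paragraph
--             result.append(stripped[2:])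
--         elif stripped.startswith("- ") and indent > 0:
--             # Nested bullet → indented list item
--             result.append(line)
--         else:
--             result.append(line)
--     return "\n".join(result)
-- ===== SOURCE B (Python) =====
-- import re
--
-- def _strip_logseq_bullets(text: str) -> str:
--     # One regex pass: MULTILINE ^ anchors to string start and each position
--     # after '\n', so exactly the zero-indent "- " bullet prefixes are removed.
--     return re.sub(r"^- ", "", text, flags=re.MULTILINE)
-- ===== Notes on version B (the rewrite author's own statement) =====
-- stated objective: idiomatic
-- what changed: Replaced A's split-on-newline / per-line lstrip-and-branch / join loop by a single multiline regex substitution re.sub(r"^- ", "", text, flags=re.MULTILINE), which deletes the leading "- " of exactly the zero-indent lines in one pass.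
import Mathlib
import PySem

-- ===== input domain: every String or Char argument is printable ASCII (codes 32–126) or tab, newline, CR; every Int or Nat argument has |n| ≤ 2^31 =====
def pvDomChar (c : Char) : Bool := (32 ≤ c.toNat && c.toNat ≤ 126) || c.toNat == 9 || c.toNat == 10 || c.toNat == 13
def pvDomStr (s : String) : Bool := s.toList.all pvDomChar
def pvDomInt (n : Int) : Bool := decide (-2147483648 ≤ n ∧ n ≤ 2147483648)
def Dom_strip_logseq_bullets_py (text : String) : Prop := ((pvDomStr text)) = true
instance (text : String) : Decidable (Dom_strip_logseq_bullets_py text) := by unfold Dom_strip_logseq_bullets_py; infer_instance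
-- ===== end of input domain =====

-- B replaces A's split / per-line branching / join loop by one multiline-regex
-- substitution (re.sub(r"^- ", "", text, flags=re.MULTILINE)); objective: idiomatic.

-- ===== PORT A =====
-- per-line body of A's for-loop
def pvStripLineA (line : List Char) : List Char :=
  let stripped := PySem.Chars.lstrip line
  let indent := line.length - stripped.length
  if PySem.Chars.startswith stripped ['-', ' '] && (indent == 0) then
    PySem.List.slice stripped (some 2) none
  else if PySem.Chars.startswith stripped ['-', ' '] && decide (0 < indent) then
    line
  else
    line

def strip_logseq_bullets_py (text : String) : String :=
  let lines := PySem.Chars.splitOn text.toList ['\n']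
  let result := lines.foldl (fun acc line => acc ++ [pvStripLineA line]) []
  String.mk (PySem.Chars.join ['\n'] result)

-- ===== PORT B =====
-- hand port of re.sub(r"^- ", "", text, flags=re.MULTILINE): one left-to-right
-- scan; `atStart` is true exactly at the MULTILINE `^` positions (string start and
-- just after each '\n'), where a literal "- " match is deleted; exact for this
-- literal pattern.
def pvSub : Bool → List Char → List Char
  | _, [] => []
  | true, c :: d :: rest =>
      if c == '-' && d == ' ' then pvSub false rest
      else c :: pvSub (c == '\n') (d :: rest)
  | true, [c] => [c]
  | false, c :: rest => c :: pvSub (c == '\n') rest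

def strip_logseq_bullets_py_alt (text : String) : String :=
  String.mk (pvSub true text.toList)

-- ===== PRECONDITION & SPEC =====
def Spec_strip_logseq_bullets_py (text : String) (out : String) : Prop := out = strip_logseq_bullets_py_alt text
instance (text : String) (out : String) : Decidable (Spec_strip_logseq_bullets_py text out) := by unfold Spec_strip_logseq_bullets_py; infer_instance

-- ===== CLAIM (what is proved, stated in full; the proofs are below) =====
def Claim_equal_strip_logseq_bullets_py : Prop := ∀ (text : String), Dom_strip_logseq_bullets_py text → Spec_strip_logseq_bullets_py text (strip_logseq_bullets_py text)

-- ===== LEMMAS AND PROOFS =====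

-- proof-side model of splitting on '\n' with an accumulated current line
def pvSplitNl : List Char → List Char → List (List Char)
  | cur, [] => [cur]
  | cur, c :: rest => if c = '\n' then cur :: pvSplitNl [] rest else pvSplitNl (cur ++ [c]) rest

-- what A's branch does to one line, in head-pattern form
def pvLineB : List Char → List Char
  | c :: d :: r => if c = '-' ∧ d = ' ' then r else c :: d :: r
  | l => l

def pvTailMap (f : List Char → List Char) : List (List Char) → List (List Char)
  | [] => []
  | x :: xs => x :: xs.map f

-- '\n'-join in recursive form
def pvJoin : List (List Char) → List Char
  | [] => []
  | [x] => x
  | x :: y :: xs => x ++ '\n' :: pvJoin (y :: xs)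

-- output of the whole scan started in true-mode / false-mode, via lines
def pvS (cs : List Char) : List Char := pvJoin ((pvSplitNl [] cs).map pvLineB)
def pvT (cs : List Char) : List Char := pvJoin (pvTailMap pvLineB (pvSplitNl [] cs))

lemma pvSplitNl_cons (cur : List Char) (c : Char) (rest : List Char) :
    pvSplitNl cur (c :: rest) =
      if c = '\n' then cur :: pvSplitNl [] rest else pvSplitNl (cur ++ [c]) rest := rfl

lemma pvSub_false_cons (c : Char) (r : List Char) :
    pvSub false (c :: r) = c :: pvSub (c == '\n') r := by cases r <;> rfl

lemma pvSub_true_one (c : Char) : pvSub true [c] = [c] := rfl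

lemma pvSub_true_two (c d : Char) (r : List Char) :
    pvSub true (c :: d :: r) =
      if c == '-' && d == ' ' then pvSub false r
      else c :: pvSub (c == '\n') (d :: r) := rfl

lemma pv_go_spec : ∀ (fuel : Nat) (cs cur : List Char) (acc : List (List Char)),
    cs.length < fuel →
    PySem.Chars.splitOn.go ['\n'] fuel cs cur acc = acc.reverse ++ pvSplitNl cur.reverse cs := by
  intro fuel
  induction fuel with
  | zero => intro cs cur acc h; omega
  | succ n ih =>
    intro cs cur acc h
    cases cs with
    | nil => simp [PySem.Chars.splitOn.go, pvSplitNl]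
    | cons c rest =>
      by_cases hc : c = '\n'
      · subst hc
        simp only [PySem.Chars.splitOn.go, List.isPrefixOf, List.isPrefixOf_nil_left,
          Bool.and_true, beq_self_eq_true, if_true]
        rw [show List.drop ['\n'].length ('\n' :: rest) = rest from rfl]
        rw [ih rest [] (cur.reverse :: acc) (by simp at h ⊢; omega)]
        rw [pvSplitNl_cons, if_pos rfl]
        simp [pvSplitNl]
      · simp only [PySem.Chars.splitOn.go, List.isPrefixOf, Bool.and_true]
        rw [if_neg (fun e => hc (beq_iff_eq.mp e).symm)]
        rw [ih rest (c :: cur) acc (by simp at h ⊢; omega)]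
        rw [pvSplitNl_cons, if_neg hc]
        simp

lemma pv_splitOn_eq (cs : List Char) :
    PySem.Chars.splitOn cs ['\n'] = pvSplitNl [] cs := by
  have h := pv_go_spec (cs.length + 1) cs [] [] (by omega)
  simpa [PySem.Chars.splitOn] using h

lemma pv_foldl_snoc (l : List (List Char)) (init : List (List Char)) :
    l.foldl (fun acc x => acc ++ [pvStripLineA x]) init = init ++ l.map pvStripLineA := by
  induction l generalizing init with
  | nil => simp
  | cons x xs ih => simp [ih]

lemma pv_condA_false (l : List Char) (h : ∀ r', l ≠ '-' :: ' ' :: r') :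
    pvStripLineA l = l := by
  unfold pvStripLineA
  by_cases hcond :
      (PySem.Chars.startswith (PySem.Chars.lstrip l) ['-', ' '] &&
        (l.length - (PySem.Chars.lstrip l).length == 0)) = true
  · exfalso
    rw [Bool.and_eq_true] at hcond
    obtain ⟨hsw, hlen⟩ := hcond
    have hle : (PySem.Chars.lstrip l).length ≤ l.length := List.length_dropWhile_le _ _
    have heq : (PySem.Chars.lstrip l).length = l.length := by
      have h0 : l.length - (PySem.Chars.lstrip l).length = 0 := by simpa using hlen
      omega
    have hstrip : PySem.Chars.lstrip l = l :=
      (List.dropWhile_suffix _).eq_of_length heq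
    rw [hstrip] at hsw
    obtain ⟨t, ht⟩ := (PySem.Chars.startswith_iff _ _).mp hsw
    exact h t ht.symm
  · rw [if_neg hcond]
    split <;> rfl

lemma pv_lineA_eq (l : List Char) : pvStripLineA l = pvLineB l := by
  cases l with
  | nil => decide
  | cons c t =>
    by_cases hc : c = '-'
    · subst hc
      cases t with
      | nil => decide
      | cons d u =>
        by_cases hd : d = ' '
        · subst hd
          unfold pvStripLineA
          have hstrip : PySem.Chars.lstrip ('-' :: ' ' :: u) = '-' :: ' ' :: u := by
            simp [PySem.Chars.lstrip, List.dropWhile_cons,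
              show PySem.Chars.isspace '-' = false from rfl]
          rw [hstrip]
          have hsw : PySem.Chars.startswith ('-' :: ' ' :: u) ['-', ' '] = true := by
            simp [PySem.Chars.startswith, List.isPrefixOf]
          simp only [hsw, Nat.sub_self, beq_self_eq_true, Bool.and_self, if_true]
          rw [PySem.List.slice_from ('-' :: ' ' :: u) (by norm_num : (0:Int) ≤ 2)]
          simp [pvLineB]
        · rw [pv_condA_false _ (by intro r' hr; injection hr with _ hr2; injection hr2 with hd2 _; exact hd hd2)]
          simp [pvLineB, hd]
    · cases t with
      | nil =>
        rw [pv_condA_false _ (by intro r' hr; injection hr with hc2 _; exact hc hc2)]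
        rfl
      | cons d u =>
        rw [pv_condA_false _ (by intro r' hr; injection hr with hc2 _; exact hc hc2)]
        simp [pvLineB, hc]

lemma pv_splitNl_eq_cons (cs : List Char) : ∀ (cur : List Char),
    pvSplitNl cur cs = (cur ++ cs.takeWhile (· ≠ '\n')) ::
      (match cs.dropWhile (· ≠ '\n') with
       | [] => []
       | _ :: rest => pvSplitNl [] rest) := by
  induction cs with
  | nil => intro cur; simp [pvSplitNl]
  | cons c rest ih =>
    intro cur
    rw [pvSplitNl_cons]
    by_cases hc : c = '\n'
    · subst hc
      rw [if_pos rfl]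
      simp [List.takeWhile_cons, List.dropWhile_cons]
    · rw [if_neg hc, ih (cur ++ [c])]
      simp [List.takeWhile_cons, List.dropWhile_cons, hc]

lemma pv_split_newline (r : List Char) :
    pvSplitNl [] ('\n' :: r) = [] :: pvSplitNl [] r := by
  rw [pvSplitNl_cons, if_pos rfl]

lemma pv_split_char (c : Char) (r : List Char) (hc : c ≠ '\n') :
    pvSplitNl [] (c :: r) = (c :: (pvSplitNl [] r).headI) :: (pvSplitNl [] r).tail := by
  rw [pv_splitNl_eq_cons (c :: r) [], pv_splitNl_eq_cons r []]
  simp [List.takeWhile_cons, List.dropWhile_cons, hc]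

lemma pv_split_shape (r : List Char) :
    pvSplitNl [] r = (pvSplitNl [] r).headI :: (pvSplitNl [] r).tail := by
  rw [pv_splitNl_eq_cons r []]
  simp

lemma pvJoin_cons_cons (a : List Char) (b : List Char) (M : List (List Char)) :
    pvJoin (a :: b :: M) = a ++ '\n' :: pvJoin (b :: M) := rfl

lemma pvJoin_cons_char (c : Char) (h : List Char) (M : List (List Char)) :
    pvJoin ((c :: h) :: M) = c :: pvJoin (h :: M) := by
  cases M <;> rfl

lemma pvChars_join_eq (L : List (List Char)) : PySem.Chars.join ['\n'] L = pvJoin L := by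
  match L with
  | [] => rw [PySem.Chars.join_nil]; rfl
  | [x] => rw [PySem.Chars.join_singleton]; rfl
  | x :: y :: xs =>
    rw [PySem.Chars.join_cons_cons, pvJoin_cons_cons, pvChars_join_eq (y :: xs)]
    simp

-- recurrences for pvS / pvT
lemma pvT_newline (r : List Char) : pvT ('\n' :: r) = '\n' :: pvS r := by
  unfold pvT pvS
  rw [pv_split_newline]
  show pvJoin ([] :: (pvSplitNl [] r).map pvLineB) = _
  rw [pv_split_shape r]
  rfl

lemma pvT_char (c : Char) (r : List Char) (hc : c ≠ '\n') :
    pvT (c :: r) = c :: pvT r := by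
  unfold pvT
  rw [pv_split_char c r hc, pv_split_shape r]
  show pvJoin ((c :: (pvSplitNl [] r).headI) :: ((pvSplitNl [] r).tail).map pvLineB) = _
  rw [pvJoin_cons_char]
  rfl

lemma pvS_one (c : Char) : pvS [c] = [c] := by
  by_cases hc : c = '\n'
  · subst hc; rfl
  · unfold pvS
    rw [pv_split_char c [] hc]
    rfl

lemma pvS_newline (r : List Char) : pvS ('\n' :: r) = '\n' :: pvS r := by
  unfold pvS
  rw [pv_split_newline, pv_split_shape r]
  show pvJoin (pvLineB [] :: _) = _
  rw [show pvLineB [] = [] from rfl]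
  rfl

lemma pvS_dash (r : List Char) : pvS ('-' :: ' ' :: r) = pvT r := by
  unfold pvS pvT
  rw [pv_split_char '-' (' ' :: r) (by decide), pv_split_char ' ' r (by decide),
    pv_split_shape r]
  show pvJoin (pvLineB ('-' :: ' ' :: (pvSplitNl [] r).headI) :: _) = _
  rw [show pvLineB ('-' :: ' ' :: (pvSplitNl [] r).headI) = (pvSplitNl [] r).headI by
    simp [pvLineB]]
  rfl

lemma pvS_char2 (c d : Char) (r : List Char) (h : ¬(c = '-' ∧ d = ' ')) (hc : c ≠ '\n') :
    pvS (c :: d :: r) = c :: pvT (d :: r) := by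
  unfold pvS pvT
  by_cases hd : d = '\n'
  · subst hd
    rw [pv_split_char c ('\n' :: r) hc, pv_split_newline, pv_split_shape r]
    show pvJoin (pvLineB [c] :: _) = _
    rw [show pvLineB [c] = [c] from rfl]
    rw [show ([c] : List Char) = c :: [] from rfl, pvJoin_cons_char]
    rfl
  · rw [pv_split_char c (d :: r) hc, pv_split_char d r hd, pv_split_shape r]
    show pvJoin (pvLineB (c :: d :: (pvSplitNl [] r).headI) :: _) = _
    rw [show pvLineB (c :: d :: (pvSplitNl [] r).headI) = c :: d :: (pvSplitNl [] r).headI by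
      simp [pvLineB, h]]
    rw [pvJoin_cons_char]
    rfl

lemma pv_main : ∀ (n : Nat) (cs : List Char), cs.length ≤ n →
    pvSub true cs = pvS cs ∧ pvSub false cs = pvT cs := by
  intro n
  induction n with
  | zero =>
    intro cs h
    have : cs = [] := List.eq_nil_of_length_eq_zero (by omega)
    subst this
    exact ⟨rfl, rfl⟩
  | succ n ih =>
    intro cs h
    cases cs with
    | nil => exact ⟨rfl, rfl⟩
    | cons c r =>
      constructor
      · -- true mode
        cases r with
        | nil => rw [pvSub_true_one, pvS_one]
        | cons d r' =>
          rw [pvSub_true_two]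
          by_cases hmatch : (c == '-' && d == ' ') = true
          · rw [if_pos hmatch]
            rw [Bool.and_eq_true, beq_iff_eq, beq_iff_eq] at hmatch
            obtain ⟨rfl, rfl⟩ := hmatch
            rw [pvS_dash]
            exact (ih r' (by simp at h; omega)).2
          · rw [if_neg hmatch]
            rw [Bool.and_eq_true] at hmatch
            by_cases hc : c = '\n'
            · subst hc
              rw [pvS_newline]
              exact congrArg _ (ih (d :: r') (by simp at h ⊢; omega)).1
            · rw [show (c == '\n') = false from beq_eq_false_iff_ne.mpr hc]
              rw [pvS_char2 c d r' (by
                intro ⟨h1, h2⟩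
                exact hmatch ⟨beq_iff_eq.mpr h1, beq_iff_eq.mpr h2⟩) hc]
              exact congrArg _ (ih (d :: r') (by simp at h ⊢; omega)).2
      · -- false mode
        rw [pvSub_false_cons]
        by_cases hc : c = '\n'
        · subst hc
          rw [show ('\n' == '\n') = true from rfl]
          rw [pvT_newline]
          exact congrArg _ (ih r (by simp at h; omega)).1
        · rw [show (c == '\n') = false from beq_eq_false_iff_ne.mpr hc]
          rw [pvT_char c r hc]
          exact congrArg _ (ih r (by simp at h; omega)).2

-- ===== VERDICT (by name: the statement is the Claim_ definition above) =====
theorem strip_logseq_bullets_py_spec : Claim_equal_strip_logseq_bullets_py := by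
  intro text _
  simp only [Spec_strip_logseq_bullets_py, strip_logseq_bullets_py, strip_logseq_bullets_py_alt]
  rw [pv_splitOn_eq, pv_foldl_snoc, pvChars_join_eq]
  have hmap : (pvSplitNl [] text.toList).map pvStripLineA
      = (pvSplitNl [] text.toList).map pvLineB :=
    List.map_congr_left (fun l _ => pv_lineA_eq l)
  rw [(pv_main text.toList.length text.toList le_rfl).1]
  simp only [pvS, List.nil_append, hmap]
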